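-- pv_equiv track=rewrite | github.com/martwebster/advent2025P | day6/day06.py | total_maths
-- ===== SOURCE A (Python) =====
-- def total_maths(lines: list):
--
--     rows = []
--     for line in lines:
--         chunks = line.split(" ")
--         chunks = [chunk for chunk in chunks if chunk != ""]
--         rows.append(chunks)
--
--     sums = []
--     for col in range(0, len(rows[0])):
--         sum = []
--         for row in rows:
--             sum.append(row[col])
--         sums.append(sum)
--
--     total = 0
--     for sum in sums:
--         operators = sum[:-1]
--         sumTotal = int(operators[0])
--         if sum[-1] == "+":
--             for part in operators[1:]:
--                 sumTotal = sumTotal + int(part)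
--         else:
--             for part in operators[1:]:
--                 sumTotal = sumTotal * int(part)
--         total = total + sumTotal
--     return total
-- ===== SOURCE B (Python) =====
-- def total_maths(lines: list):
--     grid = [[c for c in line.split(" ") if c] for line in lines]
--     ops = grid[-1]
--     accs = [0 if op == "+" else 1 for op in ops]
--     for row in grid[:-1]:
--         accs = [a + int(c) if op == "+" else a * int(c)
--                 for a, c, op in zip(accs, row, ops)]
--     return sum(accs)
-- ===== Notes on version B (the rewrite author's own statement) =====
-- stated objective: alternative
-- what changed: B never materialises A's column-major transpose: it reads the operator row once, seeds one identity accumulator per column (0 for '+', 1 for '*'), and streams the remaining rows in row-major order, zip-updating the accumulators, then sums them.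
import Mathlib
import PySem

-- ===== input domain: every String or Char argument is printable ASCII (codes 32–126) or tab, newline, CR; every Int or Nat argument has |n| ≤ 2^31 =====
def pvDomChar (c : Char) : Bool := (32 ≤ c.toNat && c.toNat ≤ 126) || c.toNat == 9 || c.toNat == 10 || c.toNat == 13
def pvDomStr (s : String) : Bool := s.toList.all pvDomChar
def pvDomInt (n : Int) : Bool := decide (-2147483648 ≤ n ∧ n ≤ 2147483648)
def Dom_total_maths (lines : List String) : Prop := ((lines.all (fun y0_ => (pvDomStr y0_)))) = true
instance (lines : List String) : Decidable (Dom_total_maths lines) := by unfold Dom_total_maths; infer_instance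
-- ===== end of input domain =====

-- B streams the grid row-by-row over zip-updated per-column accumulators (identity-seeded)
-- instead of A's materialised column-major transpose.

-- shared tokenisation: line.split(" ") with empty chunks dropped (both Pythons contain this line)
def pyTok (line : String) : List String :=
  ((PySem.Str.split? line " ").getD []).filter (fun chunk => chunk != "")

-- int(s); Pre_ guarantees every parsed cell is a valid Python int literal
def pyInt (s : String) : Int := (PySem.Int.ofStr? s).getD 0

-- ===== PORT A =====
def total_maths (lines : List String) : Int :=
  let rows := lines.map pyTok
  let sums := (PySem.List.pyRange 0 ((rows.headD []).length : Int) 1).map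
      (fun col => rows.map (fun row => PySem.List.pyGetD row col ""))
  sums.foldl
    (fun total sum =>
      let operators := PySem.List.slice sum none (some (-1))
      let sumTotal := pyInt (operators.headD "")
      let sumTotal :=
        if PySem.List.pyGetD sum (-1) "" == "+" then
          (PySem.List.slice operators (some 1) none).foldl (fun s part => s + pyInt part) sumTotal
        else
          (PySem.List.slice operators (some 1) none).foldl (fun s part => s * pyInt part) sumTotal
      total + sumTotal) 0

-- ===== PORT B =====
def total_maths_alt (lines : List String) : Int :=
  let grid := lines.map pyTok
  let ops := grid.getLast?.getD []
  let accs0 := ops.map (fun op => if op == "+" then (0 : Int) else 1)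
  let accs := (PySem.List.slice grid none (some (-1))).foldl
      (fun accs row =>
        (accs.zip (row.zip ops)).map
          (fun aco => if aco.2.2 == "+" then aco.1 + pyInt aco.2.1 else aco.1 * pyInt aco.2.1))
      accs0
  accs.sum

-- ===== PRECONDITION & SPEC =====
-- Pre_ is exactly the set of inputs on which Python A returns: a nonempty lines list (else
-- IndexError on rows[0]), at least two lines unless the first line has no chunks (else
-- operators[0] IndexError), every line with at least as many chunks as the first (else
-- IndexError in the transpose), and every consumed cell a valid int literal (else ValueError).
def Pre_total_maths (lines : List String) : Prop :=
  lines ≠ [] ∧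
  (((lines.map pyTok).headD []).length = 0 ∨ 2 ≤ lines.length) ∧
  (∀ r ∈ lines.map pyTok, ((lines.map pyTok).headD []).length ≤ r.length) ∧
  (∀ r ∈ (lines.map pyTok).dropLast, ∀ j < ((lines.map pyTok).headD []).length,
      (PySem.Int.ofStr? (r.getD j "")).isSome = true)
instance (lines : List String) : Decidable (Pre_total_maths lines) := by
  unfold Pre_total_maths; infer_instance

def pvWitness_total_maths : List String := ["1 2", "3 4", "+ *"]

def Spec_total_maths (lines : List String) (out : Int) : Prop := out = total_maths_alt lines
instance (lines : List String) (out : Int) : Decidable (Spec_total_maths lines out) := by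
  unfold Spec_total_maths; infer_instance

-- ===== CLAIM (what is proved, stated in full; the proofs are below) =====
def Claim_equal_total_maths : Prop :=
  ∀ (lines : List String), Dom_total_maths lines → Pre_total_maths lines →
    Spec_total_maths lines (total_maths lines)

-- ===== LEMMAS AND PROOFS =====

-- the per-column combining step both programs perform, as a function of the column's operator
def colStep (op : String) (a : Int) (c : String) : Int :=
  if op == "+" then a + pyInt c else a * pyInt c

-- one zip-update step of B, read at column j
lemma step_getD (ops : List String) (accs : List Int) (r : List String) (j : Nat)
    (h1 : j < accs.length) (h2 : j < r.length) (h3 : j < ops.length) :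
    ((accs.zip (r.zip ops)).map
      (fun aco => if aco.2.2 == "+" then aco.1 + pyInt aco.2.1 else aco.1 * pyInt aco.2.1)).getD j 0
    = colStep (ops.getD j "") (accs.getD j 0) (r.getD j "") := by
  have hz : j < ((accs.zip (r.zip ops)).map
      (fun aco => if aco.2.2 == "+" then aco.1 + pyInt aco.2.1 else aco.1 * pyInt aco.2.1)).length := by
    simp; omega
  rw [List.getD_eq_getElem _ 0 hz]
  simp only [List.getElem_map, List.getElem_zip]
  rw [List.getD_eq_getElem accs 0 h1, List.getD_eq_getElem r "" h2,
      List.getD_eq_getElem ops "" h3]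
  rfl

-- B's row-major fold computes, per column j < k, the column-major fold A performs.
lemma B_inv (ops : List String) (k : Nat) (hops : k ≤ ops.length)
    (ds : List (List String)) :
    ∀ (accs : List Int), accs.length = k → (∀ r ∈ ds, k ≤ r.length) →
    ds.foldl (fun accs row =>
        (accs.zip (row.zip ops)).map
          (fun aco => if aco.2.2 == "+" then aco.1 + pyInt aco.2.1 else aco.1 * pyInt aco.2.1)) accs
    = (List.range k).map (fun j =>
        ds.foldl (fun a r => colStep (ops.getD j "") a (r.getD j "")) (accs.getD j 0)) := by
  induction ds with
  | nil =>
    intro accs hlen _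
    simp only [List.foldl_nil]
    apply List.ext_getElem (by simp [hlen])
    intro j h1 h2
    simp [List.getD, List.getElem?_eq_getElem h1]
  | cons r ds ih =>
    intro accs hlen hrow
    have hr : k ≤ r.length := hrow r (by simp)
    have hlen' : ((accs.zip (r.zip ops)).map
        (fun aco => if aco.2.2 == "+" then aco.1 + pyInt aco.2.1 else aco.1 * pyInt aco.2.1)).length = k := by
      simp [hlen]; omega
    rw [List.foldl_cons, ih _ hlen' (fun r' hr' => hrow r' (by simp [hr']))]
    apply List.map_congr_left
    intro j hj
    have hj' : j < k := List.mem_range.mp hj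
    rw [List.foldl_cons, step_getD ops accs r j (by omega) (by omega) (by omega)]

-- combining into the identity seed yields the cell itself (0 + x = x, 1 * x = x)
lemma ident_colStep (op c : String) :
    colStep op (if op == "+" then (0 : Int) else 1) c = pyInt c := by
  by_cases h : op == "+" <;> simp [colStep, h]

-- A's body after tokenisation (proof helper; total_maths lines = runA (lines.map pyTok) by rfl)
def runA (rows : List (List String)) : Int :=
  ((PySem.List.pyRange 0 ((rows.headD []).length : Int) 1).map
      (fun col => rows.map (fun row => PySem.List.pyGetD row col ""))).foldl
    (fun total sum =>
      total + (if PySem.List.pyGetD sum (-1) "" == "+" then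
          (PySem.List.slice (PySem.List.slice sum none (some (-1))) (some 1) none).foldl
            (fun s part => s + pyInt part) (pyInt ((PySem.List.slice sum none (some (-1))).headD ""))
        else
          (PySem.List.slice (PySem.List.slice sum none (some (-1))) (some 1) none).foldl
            (fun s part => s * pyInt part) (pyInt ((PySem.List.slice sum none (some (-1))).headD "")))) 0

-- B's body after tokenisation (proof helper; total_maths_alt lines = runB (lines.map pyTok) by rfl)
def runB (rows : List (List String)) : Int :=
  ((PySem.List.slice rows none (some (-1))).foldl
      (fun accs row =>
        (accs.zip (row.zip (rows.getLast?.getD []))).map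
          (fun aco => if aco.2.2 == "+" then aco.1 + pyInt aco.2.1 else aco.1 * pyInt aco.2.1))
      ((rows.getLast?.getD []).map (fun op => if op == "+" then (0 : Int) else 1))).sum

-- the main case: at least two rows, every row at least as long as the first
lemma run_eq (r0 L : List String) (ds' : List (List String))
    (hops : r0.length ≤ L.length) (hds : ∀ r ∈ ds', r0.length ≤ r.length) :
    runA ((r0 :: ds') ++ [L]) = runB ((r0 :: ds') ++ [L]) := by
  have hd : ((r0 :: ds') ++ [L] : List (List String)).dropLast = r0 :: ds' :=
    List.dropLast_concat ..
  have hlast : (((r0 :: ds') ++ [L] : List (List String)).getLast?).getD [] = L := by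
    rw [List.getLast?_concat]; rfl
  unfold runA runB
  rw [PySem.List.slice_to_neg_one, hd, hlast]
  rw [List.foldl_cons,
      B_inv L r0.length hops ds' _ (by simp; omega) hds]
  have hhead : (((r0 :: ds') ++ [L] : List (List String)).headD []) = r0 := rfl
  rw [hhead, PySem.List.pyRange_zero_nat, List.map_map, PySem.List.foldl_add, List.map_map,
      zero_add]
  refine congrArg List.sum (List.map_congr_left ?_)
  intro j hj
  have hj' : j < r0.length := List.mem_range.mp hj
  simp only [Function.comp_apply]
  -- resolve the Int-indexed cell reads to Nat-indexed getD
  simp only [PySem.List.pyGetD_natCast]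
  -- the j-th column of the grid, as A materialises it
  rw [show ((r0 :: ds') ++ [L] : List (List String)).map (fun row => row.getD j "")
        = ((r0 :: ds').map (fun row => row.getD j "") ++ [L.getD j ""]) by simp]
  rw [PySem.List.slice_to_neg_one, List.dropLast_concat,
      PySem.List.pyGetD_neg_one_append_singleton, List.map_cons, PySem.List.slice_from_one]
  simp only [List.headD_cons, List.tail_cons]
  -- B's accumulator entry after the first row
  rw [step_getD L _ r0 j (by simp; omega) (by omega) (by omega)]
  rw [show ((L.map fun op => if op == "+" then (0 : Int) else 1)).getD j 0
        = (if L.getD j "" == "+" then (0 : Int) else 1) by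
      rw [List.getD_eq_getElem _ 0 (by simp; omega), List.getElem_map,
          List.getD_eq_getElem L "" (by omega)]]
  rw [ident_colStep]
  simp only [colStep, List.foldl_map, List.getD]
  split_ifs <;> simp

-- ===== VERDICT (by name: the statement is the Claim_ definition above) =====
theorem total_maths_spec : Claim_equal_total_maths := by
  intro lines _ hpre
  obtain ⟨hne, hkn, hcols, -⟩ := hpre
  have hrne : lines.map pyTok ≠ [] := by simpa using hne
  have hA : total_maths lines = runA (lines.map pyTok) := rfl
  have hB : total_maths_alt lines = runB (lines.map pyTok) := rfl
  unfold Spec_total_maths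
  rw [hA, hB]
  cases hds : (lines.map pyTok).dropLast with
  | nil =>
    -- a single line: Pre_ forces its chunk list to be empty; both programs return 0
    cases hrows : lines.map pyTok with
    | nil => exact absurd hrows hrne
    | cons a t =>
      cases t with
      | cons b t' => rw [hrows] at hds; simp at hds
      | nil =>
        have hlines1 : lines.length = 1 := by
          have := congrArg List.length hrows; simpa using this
        have hk0 : a.length = 0 := by
          rcases hkn with h | h
          · simpa [hrows] using h
          · omega
        cases a with
        | nil => decide
        | cons c cs => simp at hk0
  | cons r0 ds' =>
    have hrows : lines.map pyTok = (r0 :: ds') ++ [(lines.map pyTok).getLast hrne] := by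
      rw [← hds]; exact (List.dropLast_append_getLast hrne).symm
    have hhead : ((lines.map pyTok).headD []) = r0 := by rw [hrows]; rfl
    rw [hrows]
    apply run_eq
    · have := hcols ((lines.map pyTok).getLast hrne) (List.getLast_mem hrne)
      rwa [hhead] at this
    · intro r hr
      have hmem : r ∈ lines.map pyTok := by
        rw [hrows]; exact List.mem_append.mpr (Or.inl (List.mem_cons_of_mem _ hr))
      have := hcols r hmem
      rwa [hhead] at this
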